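-- pv_equiv track=rewrite | github.com/putian74/DAG-align | DAG_tools.py | remove_points_to_increase
-- ===== SOURCE A (Python) =====
-- def remove_points_to_increase(lst, weights):
--
--     n = len(lst)
--     dp = [0] * n
--     prev = [-1] * n
--     for i in range(n):
--         dp[i] = weights[i]
--         for j in range(i):
--             if lst[j][1][0] < lst[i][0][0] and dp[j] + weights[i] > dp[i]:
--                 dp[i] = dp[j] + weights[i]
--                 prev[i] = j
--     max_weight = max(dp)
--     index = dp.index(max_weight)
--     result = []
--     while index != -1:
--         result.append(index)
--         index = prev[index]
--     removed_indices = [i for i in range(n) if i not in result]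
--     cp_rg = []
--     for i in removed_indices:
--         cp_rg.append(lst[i])
--     return cp_rg
-- ===== SOURCE B (Python) =====
-- def remove_points_to_increase(lst, weights):
--     n = len(lst)
--     # Pareto frontier of already-seen points: list of (end_coord, (dp, -index))
--     # with both components strictly increasing; a binary search for the
--     # rightmost entry with end_coord < start finds the best predecessor.
--     front = []
--     dp = []
--     prev = []
--     best = None
--     for i in range(n):
--         if i > 0:
--             # insert point i-1 into the frontier
--             e = lst[i - 1][1][0]
--             v = (dp[i - 1], -(i - 1))
--             # p = number of frontier entries with end_coord <= e
--             lo, hi = 0, len(front)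
--             while lo < hi:
--                 mid = (lo + hi) // 2
--                 if front[mid][0] <= e:
--                     lo = mid + 1
--                 else:
--                     hi = mid
--             p = lo
--             if p == 0 or front[p - 1][1] < v:
--                 # pos = first entry with end_coord >= e
--                 lo, hi = 0, p
--                 while lo < hi:
--                     mid = (lo + hi) // 2
--                     if front[mid][0] < e:
--                         lo = mid + 1
--                     else:
--                         hi = mid
--                 pos = lo
--                 # q = first entry with value > v (those in [pos,q) are dominated)
--                 lo, hi = pos, len(front)
--                 while lo < hi:
--                     mid = (lo + hi) // 2
--                     if front[mid][1] <= v: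
--                         lo = mid + 1
--                     else:
--                         hi = mid
--                 q = lo
--                 front = front[:pos] + [(e, v)] + front[q:]
--         lo = 0
--         if front:
--             s = lst[i][0][0]
--             hi = len(front)
--             while lo < hi:
--                 mid = (lo + hi) // 2
--                 if front[mid][0] < s:
--                     lo = mid + 1
--                 else:
--                     hi = mid
--         if lo > 0 and front[lo - 1][1][0] > 0:
--             d, nj = front[lo - 1][1]
--             dp.append(d + weights[i])
--             prev.append(-nj)
--         else:
--             dp.append(weights[i])
--             prev.append(-1)
--         cur = (dp[i], -i)
--         if best is None or best < cur:
--             best = cur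
--     if best is None:
--         return []
--     keep = set()
--     j = -best[1]
--     while j != -1:
--         keep.add(j)
--         j = prev[j]
--     return [p for k, p in enumerate(lst) if k not in keep]
-- ===== Notes on version B (the rewrite author's own statement) =====
-- stated objective: alternative
-- what changed: Replaces A's O(n^2) scan over all earlier points with a sorted Pareto frontier of (end-coordinate, (dp, -index)) pairs queried and spliced via hand-written binary searches, a running best accumulator instead of the max(dp)/dp.index passes, and a kept-index set filter for the output.
import Mathlib
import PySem

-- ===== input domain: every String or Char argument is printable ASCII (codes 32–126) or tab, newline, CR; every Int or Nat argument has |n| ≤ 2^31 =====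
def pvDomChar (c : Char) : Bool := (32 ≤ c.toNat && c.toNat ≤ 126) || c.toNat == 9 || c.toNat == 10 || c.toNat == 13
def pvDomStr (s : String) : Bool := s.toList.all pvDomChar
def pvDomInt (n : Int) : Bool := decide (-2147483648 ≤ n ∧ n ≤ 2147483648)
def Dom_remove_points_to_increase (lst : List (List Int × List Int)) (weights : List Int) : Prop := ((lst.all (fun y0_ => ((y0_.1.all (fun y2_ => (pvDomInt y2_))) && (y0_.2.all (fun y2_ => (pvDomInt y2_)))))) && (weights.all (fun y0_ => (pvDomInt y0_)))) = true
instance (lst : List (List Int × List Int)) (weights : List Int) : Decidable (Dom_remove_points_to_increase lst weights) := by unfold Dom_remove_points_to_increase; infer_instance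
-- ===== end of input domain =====

-- B replaces A's all-predecessors inner scan by a sorted Pareto frontier of (end-coordinate,
-- (dp, -index)) pairs maintained with hand-written binary searches, a running best accumulator instead
-- of the max(dp)/dp.index passes, and a kept-index set filter ("alternative": a different algorithm).

-- ===== PORT A =====
-- shared data accessors: lst[i][0][0] and lst[j][1][0]
def pvHead0 (l : List Int) : Int := l.getD 0 0
def pvStart (lst : List (List Int × List Int)) (i : Nat) : Int := pvHead0 (lst.getD i ([], [])).1
def pvEnd (lst : List (List Int × List Int)) (j : Nat) : Int := pvHead0 (lst.getD j ([], [])).2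

-- inner 'for j in range(i)' loop of A: running (dp[i], prev[i]) pair
def pvA_inner (lst : List (List Int × List Int)) (dp : List Int) (wi : Int) (i : Nat) : Int × Int :=
  (List.range i).foldl
    (fun cp j =>
      if pvEnd lst j < pvStart lst i ∧ dp.getD j 0 + wi > cp.1 then (dp.getD j 0 + wi, (j : Int))
      else cp)
    (wi, -1)

-- outer 'for i in range(n)' loop of A building dp and prev (m = number of iterations done)
def pvA_dpN (lst : List (List Int × List Int)) (weights : List Int) (m : Nat) : List Int × List Int :=
  (List.range m).foldl
    (fun st i =>
      let r := pvA_inner lst st.1 (weights.getD i 0) i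
      (st.1 ++ [r.1], st.2 ++ [r.2]))
    ([], [])

def pvA_dp (lst : List (List Int × List Int)) (weights : List Int) : List Int × List Int :=
  pvA_dpN lst weights lst.length

-- 'while index != -1' loop of A (fuel n+1 suffices: prev[i] < i)
def pvA_chain (prev : List Int) : Nat → Int → List Int → List Int
  | 0, _, acc => acc
  | f+1, idx, acc =>
      if idx = -1 then acc else pvA_chain prev f (prev.getD idx.toNat (-1)) (acc ++ [idx])

def remove_points_to_increase (lst : List (List Int × List Int)) (weights : List Int) :
    List (List Int × List Int) :=
  let n := lst.length
  let dp := (pvA_dp lst weights).1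
  let prev := (pvA_dp lst weights).2
  match PySem.List.max? dp (fun x => x) with
  | none => []
  | some m =>
      let index : Int := ((PySem.List.index? dp m).getD 0 : Nat)
      let result := pvA_chain prev (n + 1) index []
      let removed := (List.range n).filter (fun i : Nat => !(result.contains ((i : Nat) : Int)))
      removed.map (fun i => lst.getD i ([], []))

-- ===== PORT B =====
-- Python tuple comparison on the (dp, -index) value pairs
def pvVlt (a b : Int × Int) : Bool := decide (a.1 < b.1 ∨ (a.1 = b.1 ∧ a.2 < b.2))
def pvVle (a b : Int × Int) : Bool := decide (a.1 < b.1 ∨ (a.1 = b.1 ∧ a.2 ≤ b.2))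

-- 'while lo < hi' binary-search loop of B (fuel hi-lo: the gap shrinks each turn)
def pvBSf : Nat → (Nat → Bool) → Nat → Nat → Nat
  | 0, _, lo, _ => lo
  | f+1, P, lo, hi =>
      if lo < hi then
        let mid := (lo + hi) / 2
        if P mid then pvBSf f P (mid + 1) hi else pvBSf f P lo mid
      else lo

def pvBS (P : Nat → Bool) (lo hi : Nat) : Nat := pvBSf (hi - lo) P lo hi

def pvFD : Int × Int × Int := (0, 0, 0)

-- frontier insertion of one point (end coordinate e, value v): skip if dominated,
-- else splice over the dominated block front[pos:q]
def pvInsertCore (front : List (Int × Int × Int)) (e : Int) (v : Int × Int) :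
    List (Int × Int × Int) :=
  let p := pvBS (fun m => decide ((front.getD m pvFD).1 ≤ e)) 0 front.length
  if p = 0 ∨ pvVlt (front.getD (p-1) pvFD).2 v then
    let pos := pvBS (fun m => decide ((front.getD m pvFD).1 < e)) 0 p
    let q := pvBS (fun m => pvVle (front.getD m pvFD).2 v) pos front.length
    front.take pos ++ [(e, v)] ++ front.drop q
  else front

-- one iteration of B's main loop; state = (front, dp, prev, best)
def pvB_step (lst : List (List Int × List Int)) (weights : List Int)
    (st : List (Int × Int × Int) × List Int × List Int × Option (Int × Int)) (i : Nat) :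
    List (Int × Int × Int) × List Int × List Int × Option (Int × Int) :=
  let front :=
    if 0 < i then pvInsertCore st.1 (pvEnd lst (i-1)) (st.2.1.getD (i-1) 0, -((i-1 : Nat) : Int))
    else st.1
  let lo :=
    if front.length ≠ 0 then
      pvBS (fun m => decide ((front.getD m pvFD).1 < pvStart lst i)) 0 front.length
    else 0
  let r : Int × Int :=
    if 0 < lo ∧ 0 < (front.getD (lo-1) pvFD).2.1 then
      ((front.getD (lo-1) pvFD).2.1 + weights.getD i 0, -(front.getD (lo-1) pvFD).2.2)
    else (weights.getD i 0, -1)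
  let dp := st.2.1 ++ [r.1]
  let prev := st.2.2.1 ++ [r.2]
  let cur : Int × Int := (dp.getD i 0, -(i : Int))
  let best := match st.2.2.2 with
    | none => some cur
    | some b => if pvVlt b cur then some cur else some b
  (front, dp, prev, best)

-- 'while j != -1' loop of B collecting the kept indices as a set
def pvB_chain (prev : List Int) : Nat → Int → PySem.Set Int → PySem.Set Int
  | 0, _, keep => keep
  | f+1, i, keep =>
      if i = -1 then keep else pvB_chain prev f (prev.getD i.toNat (-1)) (PySem.Set.add keep i)

def remove_points_to_increase_alt (lst : List (List Int × List Int)) (weights : List Int) :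
    List (List Int × List Int) :=
  let n := lst.length
  let st := (List.range n).foldl (pvB_step lst weights) ([], [], [], none)
  match st.2.2.2 with
  | none => []
  | some b =>
      let keep := pvB_chain st.2.2.1 (n + 1) (-b.2) PySem.Set.empty
      (PySem.List.enumerate lst).filterMap (fun p => if keep.contains p.1 then none else some p.2)

-- ===== PRECONDITION & SPEC =====
-- Pre_: exactly the inputs where Python A returns: a nonempty lst (max(dp) raises on empty), weights at
-- least as long as lst (weights[i] raises), and the coordinate lists A actually indexes are nonempty
-- (lst[i][0][0] for i ≥ 1, lst[j][1][0] for j < n-1 raise IndexError on []).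
def Pre_remove_points_to_increase (lst : List (List Int × List Int)) (weights : List Int) : Prop :=
  lst ≠ [] ∧ lst.length ≤ weights.length ∧
  (∀ p ∈ lst.drop 1, p.1 ≠ []) ∧ (∀ p ∈ lst.dropLast, p.2 ≠ [])
instance (lst : List (List Int × List Int)) (weights : List Int) :
    Decidable (Pre_remove_points_to_increase lst weights) := by
  unfold Pre_remove_points_to_increase; infer_instance

def pvWitness_remove_points_to_increase : (List (List Int × List Int)) × List Int :=
  ([([1], [2]), ([3], [4])], [1, 1])

def Spec_remove_points_to_increase (lst : List (List Int × List Int)) (weights : List Int)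
    (out : List (List Int × List Int)) : Prop := out = remove_points_to_increase_alt lst weights
instance (lst : List (List Int × List Int)) (weights : List Int) (out : List (List Int × List Int)) :
    Decidable (Spec_remove_points_to_increase lst weights out) := by
  unfold Spec_remove_points_to_increase; infer_instance

-- ===== CLAIM (what is proved, stated in full; the proofs are below) =====
def Claim_equal_remove_points_to_increase : Prop := ∀ (lst : List (List Int × List Int)) (weights : List Int), Dom_remove_points_to_increase lst weights → Pre_remove_points_to_increase lst weights → Spec_remove_points_to_increase lst weights (remove_points_to_increase lst weights)

-- ===== LEMMAS AND PROOFS =====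

theorem pvBSf_eq (P : Nat → Bool) : ∀ (fuel lo hi k : Nat), hi - lo ≤ fuel → lo ≤ k → k ≤ hi →
    (∀ m, lo ≤ m → m < hi → (P m = true ↔ m < k)) → pvBSf fuel P lo hi = k := by
  intro fuel
  induction fuel with
  | zero => intro lo hi k h1 h2 h3 _; simp only [pvBSf]; omega
  | succ f ih =>
    intro lo hi k h1 h2 h3 hc
    simp only [pvBSf]
    by_cases hlt : lo < hi
    · rw [if_pos hlt]
      have hmid1 : lo ≤ (lo + hi) / 2 := by omega
      have hmid2 : (lo + hi) / 2 < hi := by omega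
      by_cases hP : P ((lo + hi) / 2) = true
      · rw [if_pos hP]
        have : (lo + hi) / 2 < k := (hc _ hmid1 hmid2).mp hP
        exact ih _ _ _ (by omega) (by omega) h3 (fun m hm1 hm2 => hc m (by omega) hm2)
      · rw [if_neg hP]
        have : ¬ ((lo + hi) / 2 < k) := fun h => hP ((hc _ hmid1 hmid2).mpr h)
        exact ih _ _ _ (by omega) h2 (by omega) (fun m hm1 hm2 => hc m hm1 (by omega))
    · rw [if_neg hlt]; omega

theorem pvBS_eq (P : Nat → Bool) (lo hi k : Nat) (h2 : lo ≤ k) (h3 : k ≤ hi)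
    (hc : ∀ m, lo ≤ m → m < hi → (P m = true ↔ m < k)) : pvBS P lo hi = k :=
  pvBSf_eq P _ lo hi k le_rfl h2 h3 hc

-- value-order basics
theorem pvVle_iff (a b : Int × Int) : pvVle a b = true ↔ (a.1 < b.1 ∨ (a.1 = b.1 ∧ a.2 ≤ b.2)) := by
  simp [pvVle]
theorem pvVlt_iff (a b : Int × Int) : pvVlt a b = true ↔ (a.1 < b.1 ∨ (a.1 = b.1 ∧ a.2 < b.2)) := by
  simp [pvVlt]

theorem pvVle_refl (a : Int × Int) : pvVle a a = true := by simp [pvVle_iff]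
theorem pvVle_trans {a b c : Int × Int} (h1 : pvVle a b = true) (h2 : pvVle b c = true) :
    pvVle a c = true := by
  rw [pvVle_iff] at *; omega
theorem pvVle_antisymm {a b : Int × Int} (h1 : pvVle a b = true) (h2 : pvVle b a = true) : a = b := by
  rw [pvVle_iff] at *
  obtain ⟨a1, a2⟩ := a; obtain ⟨b1, b2⟩ := b
  simp only [Prod.mk.injEq]
  constructor <;> omega
theorem pvVlt_le {a b : Int × Int} (h : pvVlt a b = true) : pvVle a b = true := by
  rw [pvVlt_iff] at h; rw [pvVle_iff]; omega
theorem pvVle_of_not_lt {a b : Int × Int} (h : ¬ pvVlt a b = true) : pvVle b a = true := by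
  rw [pvVlt_iff] at h; rw [pvVle_iff]; omega
theorem pvVlt_of_not_le {a b : Int × Int} (h : ¬ pvVle a b = true) : pvVlt b a = true := by
  rw [pvVle_iff] at h; rw [pvVlt_iff]; omega
theorem pvVlt_of_le_ne {a b : Int × Int} (h1 : pvVle a b = true) (h2 : a ≠ b) : pvVlt a b = true := by
  rw [pvVle_iff] at h1; rw [pvVlt_iff]
  obtain ⟨a1, a2⟩ := a; obtain ⟨b1, b2⟩ := b
  simp only [ne_eq, Prod.mk.injEq, not_and] at h2
  simp only at *
  by_cases h : a1 = b1
  · subst h; simp at h2 ⊢; omega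
  · omega

-- prefix-count characterisation (takeWhile length) for downward-closed predicates on a sorted list
def pvCnt {α : Type} (P : α → Bool) (l : List α) : Nat := (l.takeWhile P).length

theorem pvCnt_le {α : Type} (P : α → Bool) (l : List α) : pvCnt P l ≤ l.length :=
  (List.takeWhile_sublist P).length_le

theorem pvCnt_char {α : Type} {R : α → α → Prop} {P : α → Bool}
    (hmono : ∀ a b, R a b → P b = true → P a = true) :
    ∀ (l : List α), l.Pairwise R → ∀ m (hm : m < l.length), (P l[m] = true ↔ m < pvCnt P l) := by
  intro l
  induction l with
  | nil => intro _ m hm; simp at hm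
  | cons a t ih =>
    intro hp m hm
    obtain ⟨ha, ht⟩ := List.pairwise_cons.mp hp
    by_cases hPa : P a = true
    · have hcnt : pvCnt P (a :: t) = pvCnt P t + 1 := by
        simp [pvCnt, List.takeWhile_cons, hPa]
      cases m with
      | zero => simpa [hcnt] using hPa
      | succ m =>
        simp only [List.getElem_cons_succ, hcnt]
        rw [ih ht m (by simpa using hm)]
        omega
    · have hcnt : pvCnt P (a :: t) = 0 := by
        simp [pvCnt, List.takeWhile_cons, hPa]
      rw [hcnt]
      simp only [Nat.not_lt_zero, iff_false]
      cases m with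
      | zero => simpa using hPa
      | succ m =>
        simp only [List.getElem_cons_succ]
        intro hPm
        exact hPa (hmono _ _ (ha _ (List.getElem_mem _)) hPm)

-- max2? basics (beyond pv_max2_snoc)
theorem pv_max2_snoc {α : Type} (k1 k2 : α → Int) (xs : List α) (y : α) :
    PySem.List.max2? (xs ++ [y]) k1 k2 =
      match PySem.List.max2? xs k1 k2 with
      | none => some y
      | some m => if k1 m < k1 y ∨ (¬ k1 y < k1 m ∧ k2 m < k2 y) then some y else some m := by
  have h : PySem.List.max2? (xs ++ [y]) k1 k2 =
      match PySem.List.max2? xs k1 k2 with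
      | none => some y
      | some m =>
        if (decide (k1 m < k1 y) || !decide (k1 y < k1 m) && decide (k2 m < k2 y)) = true then some y
        else some m := by
    simp only [PySem.List.max2?, List.foldl_append, List.foldl_cons, List.foldl_nil]
    rfl
  rw [h]
  cases PySem.List.max2? xs k1 k2 with
  | none => rfl
  | some m =>
    simp only [Bool.or_eq_true, decide_eq_true_eq, Bool.and_eq_true, Bool.not_eq_true',
      decide_eq_false_iff_not]

theorem pv_max2_none_iff {α : Type} (k1 k2 : α → Int) (l : List α) :
    PySem.List.max2? l k1 k2 = none ↔ l = [] := by
  induction l using List.reverseRecOn with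
  | nil => simp [PySem.List.max2?]
  | append_singleton xs y ih =>
    rw [pv_max2_snoc]
    cases hm : PySem.List.max2? xs k1 k2 with
    | none => simp
    | some m => simp only; split_ifs <;> simp

theorem pv_max2_mem {α : Type} (k1 k2 : α → Int) (l : List α) (c : α)
    (h : PySem.List.max2? l k1 k2 = some c) : c ∈ l := by
  induction l using List.reverseRecOn generalizing c with
  | nil => simp [PySem.List.max2?] at h
  | append_singleton xs y ih =>
    rw [pv_max2_snoc] at h
    cases hm : PySem.List.max2? xs k1 k2 with
    | none => rw [hm] at h; simp only at h; injection h with h; simp [h]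
    | some m =>
      rw [hm] at h
      simp only at h
      split_ifs at h <;> injection h with h
      · simp [h]
      · subst h; exact List.mem_append_left _ (ih _ hm)

-- on a list of value pairs with identity keys, max2? returns a lex-greatest element
theorem pv_max2_le (l : List (Int × Int)) (c : Int × Int)
    (h : PySem.List.max2? l (fun x => x.1) (fun x => x.2) = some c) :
    ∀ x ∈ l, pvVle x c = true := by
  induction l using List.reverseRecOn generalizing c with
  | nil => simp
  | append_singleton xs y ih =>
    rw [pv_max2_snoc] at h
    cases hm : PySem.List.max2? xs (fun x => x.1) (fun x => x.2) with
    | none =>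
      rw [hm] at h
      simp only at h
      injection h with h
      subst h
      intro x hx
      rcases List.mem_append.mp hx with hx | hx
      · rw [pv_max2_none_iff] at hm; subst hm; simp at hx
      · simp at hx; subst hx; exact pvVle_refl _
    | some m =>
      rw [hm] at h
      simp only at h
      split_ifs at h with hcond <;> injection h with h <;> subst h
      · intro x hx
        rcases List.mem_append.mp hx with hx | hx
        · exact pvVle_trans (ih _ hm _ hx) (by rw [pvVle_iff]; omega)
        · simp at hx; subst hx; exact pvVle_refl _
      · intro x hx
        rcases List.mem_append.mp hx with hx | hx
        · exact ih _ hm _ hx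
        · simp at hx; subst hx; rw [pvVle_iff]
          simp only [not_or, not_and, not_lt] at hcond
          omega

-- max2? equals some c whenever c is a member that dominates every element
theorem pv_max2_eq_of (l : List (Int × Int)) (c : Int × Int) (hmem : c ∈ l)
    (hmax : ∀ x ∈ l, pvVle x c = true) :
    PySem.List.max2? l (fun x => x.1) (fun x => x.2) = some c := by
  cases h : PySem.List.max2? l (fun x => x.1) (fun x => x.2) with
  | none => rw [pv_max2_none_iff] at h; subst h; simp at hmem
  | some c' =>
    have h1 : pvVle c' c = true := hmax _ (pv_max2_mem _ _ _ _ h)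
    have h2 : pvVle c c' = true := pv_max2_le _ _ h _ hmem
    rw [pvVle_antisymm h2 h1]

-- candidate values of A's inner loop: (dp[j], -j) for predecessors j with end_j < start_i
def pvCands (lst : List (List Int × List Int)) (dp : List Int) (i : Nat) : List (Int × Int) :=
  (List.range i).filterMap
    (fun j => if pvEnd lst j < pvStart lst i then some (dp.getD j 0, -(j : Int)) else none)

-- how B's branch turns the best predecessor value into (dp[i], prev[i])
def pvInterp2 (wi : Int) : Option (Int × Int) → Int × Int
  | some c => if 0 < c.1 then (c.1 + wi, -c.2) else (wi, -1)
  | none => (wi, -1)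

theorem pv_inner_gen (lst : List (List Int × List Int)) (dp : List Int) (wi s : Int) (m : Nat) :
    ((List.range m).foldl
      (fun cp j =>
        if pvEnd lst j < s ∧ dp.getD j 0 + wi > cp.1 then (dp.getD j 0 + wi, (j : Int)) else cp)
      (wi, -1)
      = pvInterp2 wi (PySem.List.max2?
          ((List.range m).filterMap
            (fun j => if pvEnd lst j < s then some (dp.getD j 0, -(j : Int)) else none))
          (fun c => c.1) (fun c => c.2)))
    ∧ (∀ c, PySem.List.max2?
          ((List.range m).filterMap
            (fun j => if pvEnd lst j < s then some (dp.getD j 0, -(j : Int)) else none))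
          (fun c => c.1) (fun c => c.2) = some c →
        ∃ j₀, j₀ < m ∧ c = (dp.getD j₀ 0, -(j₀ : Int))) := by
  induction m with
  | zero => simp [PySem.List.max2?, pvInterp2]
  | succ m ih =>
    obtain ⟨ih1, ih2⟩ := ih
    rw [List.range_succ]
    simp only [List.foldl_append, List.filterMap_append, List.foldl_cons, List.foldl_nil,
      List.filterMap_cons, List.filterMap_nil]
    rw [ih1]
    by_cases hP : pvEnd lst m < s
    · rw [if_pos hP]
      rw [pv_max2_snoc]
      cases hmax : PySem.List.max2?
          ((List.range m).filterMap
            (fun j => if pvEnd lst j < s then some (dp.getD j 0, -(j : Int)) else none))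
          (fun c => c.1) (fun c => c.2) with
      | none =>
        constructor
        · simp only [pvInterp2]
          by_cases hpos : 0 < dp.getD m 0
          · rw [if_pos ⟨hP, by omega⟩, if_pos hpos]
            simp
          · rw [if_neg (by intro h; omega), if_neg hpos]
        · intro c hc
          simp only at hc
          injection hc with hc
          exact ⟨m, by omega, hc.symm⟩
      | some c =>
        obtain ⟨j₀, hj₀, hceq⟩ := ih2 c hmax
        have hc2 : ¬ (c.2 < -(m : Int)) := by
          subst hceq; simp only []; omega
        constructor
        · simp only [pvInterp2]
          by_cases hc1 : 0 < c.1
          · by_cases hlt : c.1 < dp.getD m 0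
            · rw [if_pos hc1, if_pos ⟨hP, by omega⟩, if_pos (Or.inl hlt)]
              simp only [pvInterp2]
              rw [if_pos (by omega)]
              simp
            · rw [if_pos hc1, if_neg (by intro h; exact hlt (by omega)),
                if_neg (by rintro (h | ⟨h1, h2⟩); exact hlt h; exact hc2 h2)]
              simp only [pvInterp2]
              rw [if_pos hc1]
          · rw [if_neg hc1]
            by_cases hpos : 0 < dp.getD m 0
            · rw [if_pos ⟨hP, by omega⟩, if_pos (Or.inl (by omega))]
              simp only [pvInterp2]
              rw [if_pos hpos]
              simp
            · rw [if_neg (by intro h; omega)]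
              by_cases hlt : c.1 < dp.getD m 0
              · rw [if_pos (Or.inl hlt)]
                simp only [pvInterp2]
                rw [if_neg hpos]
              · rw [if_neg (by rintro (h | ⟨h1, h2⟩); exact hlt h; exact hc2 h2)]
                simp only [pvInterp2]
                rw [if_neg hc1]
        · intro c' hc'
          simp only at hc'
          by_cases hcond : c.1 < dp.getD m 0 ∨ (¬ dp.getD m 0 < c.1 ∧ c.2 < -(m : Int))
          · rw [if_pos hcond] at hc'
            injection hc' with hc'
            exact ⟨m, by omega, hc'.symm⟩
          · rw [if_neg hcond] at hc'
            injection hc' with hc'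
            exact ⟨j₀, by omega, hc' ▸ hceq⟩
    · have hn : (if pvEnd lst m < s then some (dp.getD m 0, -(m : Int)) else none)
          = (none : Option (Int × Int)) := if_neg hP
      rw [hn, if_neg (by intro h; exact hP h.1)]
      dsimp only
      simp only [List.append_nil]
      refine ⟨by trivial, ?_⟩
      intro c hc
      obtain ⟨j₀, hj₀, hceq⟩ := ih2 c hc
      exact ⟨j₀, by omega, hceq⟩

theorem pv_inner_eq (lst : List (List Int × List Int)) (dp : List Int) (wi : Int) (i : Nat) :
    pvA_inner lst dp wi i
      = pvInterp2 wi (PySem.List.max2? (pvCands lst dp i) (fun c => c.1) (fun c => c.2)) :=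
  (pv_inner_gen lst dp wi (pvStart lst i) i).1

theorem pvCands_congr (lst : List (List Int × List Int)) (dp dp' : List Int) (i : Nat)
    (h : ∀ j < i, dp.getD j 0 = dp'.getD j 0) : pvCands lst dp i = pvCands lst dp' i := by
  unfold pvCands
  apply List.filterMap_congr
  intro j hj
  rw [h j (List.mem_range.mp hj)]

-- the frontier invariant: sorted Pareto frontier representing points 0..bound-1
def pvRepr (lst : List (List Int × List Int)) (dpF : List Int) (bound : Nat)
    (front : List (Int × Int × Int)) : Prop :=
  List.Pairwise (fun a b => a.1 < b.1 ∧ pvVlt a.2 b.2 = true) front ∧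
  (∀ p ∈ front, ∃ j, j < bound ∧ p = (pvEnd lst j, dpF.getD j 0, -(j : Int))) ∧
  (∀ j, j < bound → ∃ p ∈ front, p.1 ≤ pvEnd lst j ∧ pvVle (dpF.getD j 0, -(j : Int)) p.2 = true)

theorem pv_front_mono {front : List (Int × Int × Int)}
    (hs : List.Pairwise (fun a b => a.1 < b.1 ∧ pvVlt a.2 b.2 = true) front)
    {m m' : Nat} (hle : m ≤ m') (hm' : m' < front.length) :
    pvVle (front[m]'(by omega)).2 (front[m']).2 = true := by
  rcases Nat.lt_or_ge m m' with h | h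
  · exact pvVlt_le ((List.pairwise_iff_getElem.mp hs) m m' (by omega) hm' h).2
  · have : m = m' := by omega
    subst this
    exact pvVle_refl _

theorem pv_mem_cands {lst : List (List Int × List Int)} {dp : List Int} {i : Nat} {x : Int × Int} :
    x ∈ pvCands lst dp i ↔
      ∃ j, j < i ∧ pvEnd lst j < pvStart lst i ∧ x = (dp.getD j 0, -(j : Int)) := by
  unfold pvCands
  rw [List.mem_filterMap]
  constructor
  · rintro ⟨j, hj, hfx⟩
    rw [List.mem_range] at hj
    by_cases hc : pvEnd lst j < pvStart lst i
    · rw [if_pos hc] at hfx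
      injection hfx with hfx
      exact ⟨j, hj, hc, hfx.symm⟩
    · rw [if_neg hc] at hfx; exact absurd hfx (by simp)
  · rintro ⟨j, hj, hc, hx⟩
    exact ⟨j, List.mem_range.mpr hj, by rw [if_pos hc, hx]⟩

theorem pv_query (lst : List (List Int × List Int)) (dpF : List Int) (i : Nat)
    (front : List (Int × Int × Int)) (h : pvRepr lst dpF i front) :
    PySem.List.max2? (pvCands lst dpF i) (fun c => c.1) (fun c => c.2) =
      (if pvCnt (fun pr => decide (pr.1 < pvStart lst i)) front = 0 then none
       else some ((front.getD (pvCnt (fun pr => decide (pr.1 < pvStart lst i)) front - 1) pvFD).2)) := by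
  obtain ⟨hs, hsub, hdom⟩ := h
  have char := pvCnt_char (R := fun a b => a.1 < b.1 ∧ pvVlt a.2 b.2 = true)
    (P := fun pr => decide (pr.1 < pvStart lst i))
    (by intro a b hR hPb; simp only [decide_eq_true_eq] at *; omega) front hs
  set s := pvStart lst i with hsdef
  set k := pvCnt (fun pr => decide (pr.1 < s)) front with hkdef
  have hklen : k ≤ front.length := pvCnt_le _ _
  by_cases hk : k = 0
  · rw [if_pos hk, pv_max2_none_iff]
    by_contra hne
    obtain ⟨x, hx⟩ := List.exists_mem_of_ne_nil _ hne
    obtain ⟨j, hj, hcomp, hxeq⟩ := pv_mem_cands.mp hx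
    obtain ⟨p, hp, hp1, hp2⟩ := hdom j hj
    obtain ⟨m, hm, hmp⟩ := List.mem_iff_getElem.mp hp
    have : m < k := (char m hm).mp (by rw [hmp]; simp only [decide_eq_true_eq]; omega)
    omega
  · rw [if_neg hk]
    have hk1 : k - 1 < front.length := by omega
    have hgetD : front.getD (k-1) pvFD = front[k-1] := List.getD_eq_getElem front pvFD hk1
    obtain ⟨j', hj', hpeq⟩ := hsub front[k-1] (List.getElem_mem hk1)
    have hlt : front[k-1].1 < s := by
      have := (char (k-1) hk1).mpr (by omega)
      simpa using this
    have hcval : front[k-1].2 = (dpF.getD j' 0, -(j' : Int)) := by rw [hpeq]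
    have hend : front[k-1].1 = pvEnd lst j' := by rw [hpeq]
    have hmem : front[k-1].2 ∈ pvCands lst dpF i :=
      pv_mem_cands.mpr ⟨j', hj', by rw [← hend]; exact hlt, hcval⟩
    have hmax : ∀ x ∈ pvCands lst dpF i, pvVle x front[k-1].2 = true := by
      intro x hx
      obtain ⟨j, hj, hcomp, hxeq⟩ := pv_mem_cands.mp hx
      obtain ⟨p, hp, hp1, hp2⟩ := hdom j hj
      obtain ⟨m, hm, hmp⟩ := List.mem_iff_getElem.mp hp
      have hmk : m < k := (char m hm).mp (by rw [hmp]; simp only [decide_eq_true_eq]; omega)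
      have h1 : pvVle (front[m]'(by omega)).2 front[k-1].2 = true := pv_front_mono hs (by omega) hk1
      rw [hmp] at h1
      exact pvVle_trans (by rw [hxeq]; exact hp2) h1
    rw [hgetD]
    exact pv_max2_eq_of _ _ hmem hmax

theorem pv_mem_take_idx {front : List (Int × Int × Int)} {k : Nat} {x : Int × Int × Int}
    (hx : x ∈ front.take k) : ∃ m, m < k ∧ ∃ hm : m < front.length, front[m] = x := by
  obtain ⟨m, hm, hmx⟩ := List.mem_iff_getElem.mp hx
  have hlen : m < k ∧ m < front.length := by
    have := hm; rw [List.length_take] at this; omega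
  exact ⟨m, hlen.1, hlen.2, by rw [← List.getElem_take (h := hm)]; exact hmx⟩

theorem pv_mem_drop_idx {front : List (Int × Int × Int)} {k : Nat} {x : Int × Int × Int}
    (hx : x ∈ front.drop k) : ∃ m, k ≤ m ∧ ∃ hm : m < front.length, front[m] = x := by
  obtain ⟨m, hm, hmx⟩ := List.mem_iff_getElem.mp hx
  have hlen : k + m < front.length := by
    have := hm; rw [List.length_drop] at this; omega
  exact ⟨k + m, by omega, hlen, by rw [← List.getElem_drop (h := hm)]; exact hmx⟩

theorem pv_idx_mem_take {l : List (Int × Int × Int)} {k m : Nat} (h1 : m < k)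
    (h2 : m < l.length) : l[m] ∈ l.take k :=
  List.mem_iff_getElem.mpr ⟨m, by rw [List.length_take]; omega, List.getElem_take⟩

theorem pv_idx_mem_drop {l : List (Int × Int × Int)} {k m : Nat} (h1 : k ≤ m)
    (h2 : m < l.length) : l[m] ∈ l.drop k :=
  List.mem_iff_getElem.mpr ⟨m - k, by rw [List.length_drop]; omega,
    by rw [List.getElem_drop]; congr 1; omega⟩

theorem pv_insert_repr (lst : List (List Int × List Int)) (dpF : List Int) (jq : Nat)
    (front : List (Int × Int × Int)) (h : pvRepr lst dpF jq front) :
    pvRepr lst dpF (jq + 1)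
      (pvInsertCore front (pvEnd lst jq) (dpF.getD jq 0, -(jq : Int))) := by
  obtain ⟨hs, hsub, hdom⟩ := h
  set e := pvEnd lst jq with hedef
  set v : Int × Int := (dpF.getD jq 0, -(jq : Int)) with hvdef
  have hfresh : ∀ p ∈ front, p.2 ≠ v := by
    intro p hp heq
    obtain ⟨j, hj, rfl⟩ := hsub p hp
    have : -(j : Int) = -(jq : Int) := congrArg Prod.snd heq
    omega
  set n := front.length with hndef
  set kle := pvCnt (fun pr => decide (pr.1 ≤ e)) front with hkledef
  set klt := pvCnt (fun pr => decide (pr.1 < e)) front with hkltdef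
  set kv := pvCnt (fun pr => pvVle pr.2 v) front with hkvdef
  have charle := pvCnt_char (R := fun a b => a.1 < b.1 ∧ pvVlt a.2 b.2 = true)
    (P := fun pr => decide (pr.1 ≤ e))
    (by intro a b hR hPb; simp only [decide_eq_true_eq] at *; omega) front hs
  have charlt := pvCnt_char (R := fun a b => a.1 < b.1 ∧ pvVlt a.2 b.2 = true)
    (P := fun pr => decide (pr.1 < e))
    (by intro a b hR hPb; simp only [decide_eq_true_eq] at *; omega) front hs
  have charv := pvCnt_char (R := fun a b => a.1 < b.1 ∧ pvVlt a.2 b.2 = true)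
    (P := fun pr => pvVle pr.2 v)
    (by intro a b hR hPb; exact pvVle_trans (pvVlt_le hR.2) hPb) front hs
  have hkle_n : kle ≤ n := pvCnt_le _ _
  have hklt_n : klt ≤ n := pvCnt_le _ _
  have hkv_n : kv ≤ n := pvCnt_le _ _
  have hklt_le : klt ≤ kle := by
    by_contra hcon
    have h1 : kle < n := by omega
    have h2 := (charlt kle h1).mpr (by omega)
    have h3 := (charle kle h1).mp (by simp only [decide_eq_true_eq] at *; omega)
    omega
  have hp_eq : pvBS (fun m => decide ((front.getD m pvFD).1 ≤ e)) 0 front.length = kle := by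
    apply pvBS_eq _ _ _ _ (by omega) hkle_n
    intro m _ hm
    rw [List.getD_eq_getElem front pvFD hm]
    exact charle m hm
  unfold pvInsertCore
  rw [hp_eq]
  by_cases hbr : kle = 0 ∨ pvVlt (front.getD (kle-1) pvFD).2 v = true
  · rw [if_pos hbr]
    have hvlt : ∀ _ : 0 < kle, pvVlt (front[kle-1]'(by omega)).2 v = true := by
      intro hpos
      rcases hbr with h | h
      · omega
      · rwa [List.getD_eq_getElem front pvFD (by omega)] at h
    have hkle_kv : kle ≤ kv := by
      rcases Nat.eq_zero_or_pos kle with h | h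
      · omega
      · have := (charv (kle-1) (by omega)).mp (pvVlt_le (hvlt h))
        omega
    have pos_eq : pvBS (fun m => decide ((front.getD m pvFD).1 < e)) 0 kle = klt := by
      apply pvBS_eq _ _ _ _ (by omega) hklt_le
      intro m _ hm
      rw [List.getD_eq_getElem front pvFD (by omega)]
      exact charlt m (by omega)
    have q_eq : pvBS (fun m => pvVle (front.getD m pvFD).2 v) klt front.length = kv := by
      apply pvBS_eq _ _ _ _ (by omega) hkv_n
      intro m _ hm
      rw [List.getD_eq_getElem front pvFD hm]
      exact charv m hm
    simp only [pos_eq, q_eq]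
    have fact_lo : ∀ m (hm : m < klt),
        (front[m]'(by omega)).1 < e ∧ pvVlt (front[m]'(by omega)).2 v = true := by
      intro m hm
      have h1 := (charlt m (by omega)).mpr (by omega)
      have h2 := (charv m (by omega)).mpr (by omega)
      refine ⟨by simpa using h1, ?_⟩
      exact pvVlt_of_le_ne h2 (hfresh _ (List.getElem_mem _))
    have fact_hi : ∀ m (hm1 : kv ≤ m) (hm2 : m < n),
        e < (front[m]'(by omega)).1 ∧ pvVlt v (front[m]'(by omega)).2 = true := by
      intro m hm1 hm2
      constructor
      · have : ¬ (decide ((front[m]'(by omega)).1 ≤ e) = true) := by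
          intro hcon
          have := (charle m hm2).mp hcon
          omega
        simp only [decide_eq_true_eq] at this
        omega
      · apply pvVlt_of_not_le
        intro hcon
        have := (charv m hm2).mp hcon
        omega
    constructor
    · -- sortedness of the new frontier
      rw [List.append_assoc]
      refine List.pairwise_append.mpr ⟨List.Pairwise.take hs, ?_, ?_⟩
      · refine List.pairwise_append.mpr ⟨List.pairwise_singleton _ _, List.Pairwise.drop hs, ?_⟩
        intro a ha b hb
        simp only [List.mem_singleton] at ha
        subst ha
        obtain ⟨m, hm1, hm2, hmb⟩ := pv_mem_drop_idx hb
        obtain ⟨hf1, hf2⟩ := fact_hi m hm1 hm2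
        rw [← hmb]
        exact ⟨hf1, hf2⟩
      · intro a ha b hb
        obtain ⟨m, hm, hma, hmaf⟩ := pv_mem_take_idx ha
        rcases List.mem_append.mp hb with hb | hb
        · simp only [List.mem_singleton] at hb
          subst hb
          obtain ⟨hf1, hf2⟩ := fact_lo m hm
          rw [← hmaf]
          exact ⟨hf1, hf2⟩
        · obtain ⟨m', hm'1, hm'2, hmb⟩ := pv_mem_drop_idx hb
          rw [← hmaf, ← hmb]
          exact (List.pairwise_iff_getElem.mp hs) m m' hma hm'2 (by omega)
    constructor
    · -- every frontier entry is one of the points 0..jq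
      intro x hx
      rcases List.mem_append.mp hx with hx | hx
      · rcases List.mem_append.mp hx with hx | hx
        · obtain ⟨j, hj, he⟩ := hsub x (List.mem_of_mem_take hx)
          exact ⟨j, by omega, he⟩
        · simp only [List.mem_singleton] at hx
          exact ⟨jq, by omega, by rw [hx]⟩
      · obtain ⟨j, hj, he⟩ := hsub x (List.mem_of_mem_drop hx)
        exact ⟨j, by omega, he⟩
    · -- every point 0..jq is dominated by some frontier entry
      intro j hj
      rcases Nat.lt_or_ge j jq with hjlt | hjge
      · obtain ⟨p, hp, hp1, hp2⟩ := hdom j hjlt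
        obtain ⟨m, hm, hmp⟩ := List.mem_iff_getElem.mp hp
        by_cases hcase1 : m < klt
        · refine ⟨p, ?_, hp1, hp2⟩
          rw [← hmp]
          exact List.mem_append_left _ (List.mem_append_left _ (pv_idx_mem_take hcase1 hm))
        · by_cases hcase2 : kv ≤ m
          · refine ⟨p, ?_, hp1, hp2⟩
            rw [← hmp]
            exact List.mem_append_right _ (pv_idx_mem_drop hcase2 hm)
          · refine ⟨(e, v), by simp, ?_, ?_⟩
            · have h4 : ¬ ((front[m]'hm).1 < e) := by
                intro hcon
                have := (charlt m hm).mp (by simpa using hcon)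
                omega
              rw [hmp] at h4
              show (e, v).1 ≤ pvEnd lst j
              simp only
              omega
            · have hmv := (charv m hm).mpr (by omega)
              rw [hmp] at hmv
              exact pvVle_trans hp2 hmv
      · have hjeq : j = jq := by omega
        subst hjeq
        exact ⟨(e, v), by simp, le_refl _, pvVle_refl _⟩
  · rw [if_neg hbr]
    push_neg at hbr
    obtain ⟨hne, hnlt⟩ := hbr
    refine ⟨hs, ?_, ?_⟩
    · intro p hp
      obtain ⟨j, hj, he⟩ := hsub p hp
      exact ⟨j, by omega, he⟩
    · intro j hj
      rcases Nat.lt_or_ge j jq with hjlt | hjge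
      · obtain ⟨p, hp, hp1, hp2⟩ := hdom j hjlt
        exact ⟨p, hp, hp1, hp2⟩
      · have hjeq : j = jq := by omega
        subst hjeq
        have hk1 : kle - 1 < n := by omega
        refine ⟨front[kle-1], List.getElem_mem hk1, ?_, ?_⟩
        · have := (charle (kle-1) hk1).mpr (by omega)
          simpa using this
        · have := pvVle_of_not_lt (a := (front.getD (kle-1) pvFD).2) (b := v)
            hnlt
          rwa [List.getD_eq_getElem front pvFD hk1] at this

-- A-side: the dp/prev fold only appends; prefixes are stable
theorem pvA_dpN_succ (lst : List (List Int × List Int)) (weights : List Int) (m : Nat) :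
    pvA_dpN lst weights (m+1) =
      ((pvA_dpN lst weights m).1 ++
          [(pvA_inner lst (pvA_dpN lst weights m).1 (weights.getD m 0) m).1],
       (pvA_dpN lst weights m).2 ++
          [(pvA_inner lst (pvA_dpN lst weights m).1 (weights.getD m 0) m).2]) := by
  rw [pvA_dpN, List.range_succ, List.foldl_append, List.foldl_cons, List.foldl_nil]
  rfl

theorem pvA_dpN_len (lst : List (List Int × List Int)) (weights : List Int) (m : Nat) :
    (pvA_dpN lst weights m).1.length = m ∧ (pvA_dpN lst weights m).2.length = m := by
  induction m with
  | zero => simp [pvA_dpN]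
  | succ m ih =>
    rw [pvA_dpN_succ]
    simp only [List.length_append, List.length_cons, List.length_nil]
    omega

theorem pvA_dpN_take (lst : List (List Int × List Int)) (weights : List Int) (i : Nat) :
    ∀ m, i ≤ m →
      (pvA_dpN lst weights m).1.take i = (pvA_dpN lst weights i).1 ∧
      (pvA_dpN lst weights m).2.take i = (pvA_dpN lst weights i).2 := by
  intro m
  induction m with
  | zero => intro h; have : i = 0 := by omega
            subst this; simp [pvA_dpN]
  | succ m ih =>
    intro h
    rcases Nat.lt_or_ge i (m+1) with hlt | hge
    · have him : i ≤ m := by omega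
      rw [pvA_dpN_succ]
      constructor
      · rw [List.take_append_of_le_length (by rw [(pvA_dpN_len lst weights m).1]; omega)]
        exact (ih him).1
      · rw [List.take_append_of_le_length (by rw [(pvA_dpN_len lst weights m).2]; omega)]
        exact (ih him).2
    · have : i = m + 1 := by omega
      subst this
      constructor
      · exact List.take_of_length_le (by rw [(pvA_dpN_len lst weights (m+1)).1])
      · exact List.take_of_length_le (by rw [(pvA_dpN_len lst weights (m+1)).2])

theorem pv_getD_take {l : List Int} {i j : Nat} (hj : j < i) (hi : i ≤ l.length) :
    (l.take i).getD j 0 = l.getD j 0 := by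
  rw [List.getD_eq_getElem l 0 (by omega),
    List.getD_eq_getElem (l.take i) 0 (by rw [List.length_take]; omega)]
  exact List.getElem_take

theorem pv_getD_snoc (l : List Int) (x : Int) : (l ++ [x]).getD l.length 0 = x := by
  rw [List.getD_eq_getElem (l ++ [x]) 0 (by simp)]
  simp

theorem pv_getD_snoc' {l : List Int} {x : Int} {i : Nat} (h : l.length = i) :
    (l ++ [x]).getD i 0 = x := by subst h; exact pv_getD_snoc l x

-- first-argmax of dp as a max2? over indices (used to line A's dp.index(max(dp)) up with B's best)
theorem pv_max2_range (f : Nat → Int) (n : Nat) (hn : 0 < n) :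
    ∃ b, PySem.List.max2? (List.range n) (fun k => f k) (fun k => -(k : Int)) = some b ∧
      b < n ∧ (∀ k < n, f k ≤ f b) ∧ (∀ k < b, f k < f b) := by
  induction n with
  | zero => omega
  | succ n ih =>
    rcases Nat.eq_zero_or_pos n with hz | hpos
    · subst hz
      refine ⟨0, ?_, by omega, ?_, by omega⟩
      · simp [PySem.List.max2?, List.range_succ]
      · intro k hk
        interval_cases k
        exact le_refl _
    · obtain ⟨b, hb, hbn, hmax, hstrict⟩ := ih hpos
      rw [List.range_succ, pv_max2_snoc, hb]
      by_cases hlt : f b < f n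
      · refine ⟨n, by simp [hlt], by omega, ?_, ?_⟩
        · intro k hk
          rcases Nat.lt_or_ge k n with h | h
          · exact le_of_lt (lt_of_le_of_lt (hmax k h) hlt)
          · have : k = n := by omega
            subst this; exact le_refl _
        · intro k hk
          exact lt_of_le_of_lt (hmax k hk) hlt
      · have hcond : ¬ (f b < f n ∨ (¬ f n < f b ∧ -(b : Int) < -(n : Int))) := by
          rintro (h | ⟨h1, h2⟩)
          · exact hlt h
          · omega
        refine ⟨b, by simp [hlt]; omega, by omega, ?_, hstrict⟩
        intro k hk
        rcases Nat.lt_or_ge k n with h | h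
        · exact hmax k h
        · have : k = n := by omega
          subst this; omega

theorem pv_argmax_eq (dp : List Int) (hne : dp ≠ []) :
    ∃ m k, PySem.List.max? dp (fun x => x) = some m ∧ PySem.List.index? dp m = some k ∧
      PySem.List.max2? (List.range dp.length) (fun j => dp.getD j 0) (fun j => -(j : Int)) = some k := by
  cases hm : PySem.List.max? dp (fun x => x) with
  | none => exact absurd ((PySem.List.max?_eq_none_iff dp _).mp hm) hne
  | some m =>
    have hmem : m ∈ dp := PySem.List.max?_mem hm
    have hmax : ∀ y ∈ dp, y ≤ m := PySem.List.max?_isMax hm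
    cases hk : PySem.List.index? dp m with
    | none =>
      have := (PySem.List.index?_isSome_iff dp m).mpr hmem
      rw [hk] at this; simp at this
    | some k =>
      obtain ⟨hklen, hkval, hkfirst⟩ := PySem.List.getElem_of_index?_eq_some hk
      have hlen : 0 < dp.length := List.length_pos_iff.mpr hne
      obtain ⟨b, hb, hbn, hbmax, hbstrict⟩ :=
        pv_max2_range (fun j => dp.getD j 0) dp.length hlen
      have hgetb : dp.getD b 0 = dp[b] := List.getD_eq_getElem dp 0 hbn
      have hgetk : dp.getD k 0 = dp[k] := List.getD_eq_getElem dp 0 hklen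
      have hbm : dp.getD b 0 = m := by
        have h1 : dp.getD b 0 ≤ m := by rw [hgetb]; exact hmax _ (List.getElem_mem hbn)
        have h2 : m ≤ dp.getD b 0 := by
          have := hbmax k hklen
          rw [hgetk, hkval] at this
          exact this
        omega
      have hbk : b = k := by
        rcases Nat.lt_trichotomy b k with h | h | h
        · exfalso
          apply hkfirst b h
          rw [← hgetb, hbm]
        · exact h
        · exfalso
          have := hbstrict k h
          rw [hgetk, hkval, hbm] at this
          omega
      refine ⟨m, k, rfl, hk, ?_⟩
      rw [← hbk]
      exact hb

theorem pv_chain_mem (prev : List Int) :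
    ∀ (fuel : Nat) (idx : Int) (acc : List Int) (keep : PySem.Set Int),
      (∀ x : Int, x ∈ acc ↔ x ∈ keep) →
      ∀ x : Int, x ∈ pvA_chain prev fuel idx acc ↔ x ∈ pvB_chain prev fuel idx keep := by
  intro fuel
  induction fuel with
  | zero => intro idx acc keep h x; simpa [pvA_chain, pvB_chain] using h x
  | succ f ih =>
    intro idx acc keep h x
    simp only [pvA_chain, pvB_chain]
    by_cases hidx : idx = -1
    · simpa [hidx] using h x
    · rw [if_neg hidx, if_neg hidx]
      apply ih
      intro y
      rw [List.mem_append, List.mem_singleton, PySem.Set.mem_add, h y]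

theorem pv_final_eq (lst : List (List Int × List Int)) (result : List Int) (keep : PySem.Set Int)
    (hmem : ∀ x : Int, x ∈ result ↔ x ∈ keep) (l : List Nat) :
    (l.filter (fun i : Nat => !(result.contains ((i : Nat) : Int)))).map
        (fun i => lst.getD i ([], []))
      = (l.map (fun j : Nat => (((j : Nat) : Int), lst.getD j ([], [])))).filterMap
          (fun p => if keep.contains p.1 then none else some p.2) := by
  induction l with
  | nil => simp
  | cons a t ih =>
    simp only [List.filter_cons, List.map_cons, List.filterMap_cons]
    by_cases h : ((a : Nat) : Int) ∈ keep
    · have hR : ((a : Nat) : Int) ∈ result := (hmem _).mpr h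
      simp [hR, h]
      simpa using ih
    · have hR : ((a : Nat) : Int) ∉ result := fun hc => h ((hmem _).mp hc)
      simp [hR, h]
      simpa using ih

theorem pv_main (lst : List (List Int × List Int)) (weights : List Int) :
    ∀ i, i ≤ lst.length →
      (((List.range i).foldl (pvB_step lst weights) ([], [], [], none)).2.1
          = (pvA_dpN lst weights i).1) ∧
      (((List.range i).foldl (pvB_step lst weights) ([], [], [], none)).2.2.1
          = (pvA_dpN lst weights i).2) ∧
      pvRepr lst (pvA_dp lst weights).1 (i - 1)
        (((List.range i).foldl (pvB_step lst weights) ([], [], [], none)).1) ∧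
      (((List.range i).foldl (pvB_step lst weights) ([], [], [], none)).2.2.2
          = (PySem.List.max2? (List.range i) (fun k => (pvA_dp lst weights).1.getD k 0)
              (fun k : Nat => -(k : Int))).map
              (fun k : Nat => ((pvA_dp lst weights).1.getD k 0, -(k : Int)))) := by
  intro i
  induction i with
  | zero =>
    intro _
    refine ⟨rfl, rfl, ⟨List.Pairwise.nil, by simp, by intro j hj; omega⟩, rfl⟩
  | succ i ih =>
    intro hi1
    have hi : i ≤ lst.length := by omega
    obtain ⟨ih1, ih2, ih3, ih4⟩ := ih hi
    set dpF := (pvA_dp lst weights).1 with hdpF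
    have hdpFlen : dpF.length = lst.length := by
      rw [hdpF, pvA_dp]; exact (pvA_dpN_len lst weights lst.length).1
    have htake1 : dpF.take i = (pvA_dpN lst weights i).1 := by
      rw [hdpF, pvA_dp]; exact (pvA_dpN_take lst weights i _ hi).1
    have htake2 : dpF.take (i+1) = (pvA_dpN lst weights (i+1)).1 := by
      rw [hdpF, pvA_dp]; exact (pvA_dpN_take lst weights (i+1) _ hi1).1
    have hgetd : ∀ j, j < i → (pvA_dpN lst weights i).1.getD j 0 = dpF.getD j 0 := by
      intro j hj
      rw [← htake1, pv_getD_take hj (by omega)]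
    rw [List.range_succ, List.foldl_append, List.foldl_cons, List.foldl_nil]
    set st := (List.range i).foldl (pvB_step lst weights) ([], [], [], none) with hst
    have hfront : pvRepr lst dpF i
        (if 0 < i then
          pvInsertCore st.1 (pvEnd lst (i-1)) (st.2.1.getD (i-1) 0, -(((i-1) : Nat) : Int))
        else st.1) := by
      by_cases hip : 0 < i
      · rw [if_pos hip]
        have hv : st.2.1.getD (i-1) 0 = dpF.getD (i-1) 0 := by
          rw [ih1]; exact hgetd (i-1) (by omega)
        rw [hv]
        have := pv_insert_repr lst dpF (i-1) st.1 ih3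
        rwa [show i - 1 + 1 = i from by omega] at this
      · rw [if_neg hip]
        have h0 : i - 1 = i := by omega
        rw [← h0]
        exact ih3
    simp only [pvB_step]
    set F := (if 0 < i then
          pvInsertCore st.1 (pvEnd lst (i-1)) (st.2.1.getD (i-1) 0, -(((i-1) : Nat) : Int))
        else st.1) with hFdef
    have hq := pv_query lst dpF i F hfront
    set k := pvCnt (fun pr => decide (pr.1 < pvStart lst i)) F with hkdef
    have hklen : k ≤ F.length := pvCnt_le _ _
    have hlo : (if F.length ≠ 0 then
          pvBS (fun m => decide ((F.getD m pvFD).1 < pvStart lst i)) 0 F.length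
        else 0) = k := by
      by_cases hFe : F.length = 0
      · rw [if_neg (by simpa using hFe)]
        have hFnil : F = [] := List.length_eq_zero_iff.mp hFe
        rw [hkdef, hFnil]
        rfl
      · rw [if_pos hFe]
        apply pvBS_eq _ _ _ _ (by omega) hklen
        intro m _ hm
        rw [List.getD_eq_getElem F pvFD hm]
        exact pvCnt_char (R := fun a b => a.1 < b.1 ∧ pvVlt a.2 b.2 = true)
          (P := fun pr => decide (pr.1 < pvStart lst i))
          (by intro a b hR hPb; simp only [decide_eq_true_eq] at *; omega) F hfront.1 m hm
    rw [hlo]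
    have hr : (if 0 < k ∧ 0 < (F.getD (k-1) pvFD).2.1 then
          ((F.getD (k-1) pvFD).2.1 + weights.getD i 0, -(F.getD (k-1) pvFD).2.2)
        else (weights.getD i 0, -1))
        = pvInterp2 (weights.getD i 0)
            (PySem.List.max2? (pvCands lst dpF i) (fun c => c.1) (fun c => c.2)) := by
      rw [hq]
      by_cases hk0 : k = 0
      · rw [if_pos hk0, if_neg (by omega)]
        rfl
      · rw [if_neg hk0]
        simp only [pvInterp2]
        by_cases hc1 : 0 < (F.getD (k-1) pvFD).2.1
        · rw [if_pos ⟨by omega, hc1⟩, if_pos hc1]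
        · rw [if_neg (by intro h; exact hc1 h.2), if_neg hc1]
    have hrA : pvA_inner lst (pvA_dpN lst weights i).1 (weights.getD i 0) i
        = pvInterp2 (weights.getD i 0)
            (PySem.List.max2? (pvCands lst dpF i) (fun c => c.1) (fun c => c.2)) := by
      rw [pv_inner_eq, pvCands_congr lst (pvA_dpN lst weights i).1 dpF i hgetd]
    have hreq : (if 0 < k ∧ 0 < (F.getD (k-1) pvFD).2.1 then
          ((F.getD (k-1) pvFD).2.1 + weights.getD i 0, -(F.getD (k-1) pvFD).2.2)
        else (weights.getD i 0, -1))
        = pvA_inner lst (pvA_dpN lst weights i).1 (weights.getD i 0) i := hr.trans hrA.symm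
    rw [hreq]
    have hlen_st : st.2.1.length = i := by
      rw [ih1]; exact (pvA_dpN_len lst weights i).1
    have hcur : (st.2.1 ++
          [(pvA_inner lst (pvA_dpN lst weights i).1 (weights.getD i 0) i).1]).getD i 0
        = dpF.getD i 0 := by
      rw [← hlen_st, pv_getD_snoc, hlen_st]
      have h1 : dpF.getD i 0 = (dpF.take (i+1)).getD i 0 :=
        (pv_getD_take (by omega) (by omega)).symm
      rw [h1, htake2, pvA_dpN_succ]
      exact (pv_getD_snoc' (pvA_dpN_len lst weights i).1).symm
    refine ⟨?_, ?_, ?_, ?_⟩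
    · rw [ih1, pvA_dpN_succ]
    · rw [ih2, pvA_dpN_succ]
    · exact hfront
    · rw [ih4, hcur]
      rw [pv_max2_snoc]
      cases hmax : PySem.List.max2? (List.range i) (fun k => dpF.getD k 0)
          (fun k : Nat => -(k : Int)) with
      | none =>
        simp only [Option.map_none, Option.map_some]
      | some kb =>
        have hkb : kb < i := by
          have := pv_max2_mem _ _ _ _ hmax
          simpa [List.mem_range] using this
        simp only [Option.map_some]
        by_cases hC : dpF.getD kb 0 < dpF.getD i 0
        · rw [if_pos (by rw [pvVlt_iff]; left; exact hC), if_pos (Or.inl hC)]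
          simp
        · rw [if_neg (by rw [pvVlt_iff]; simp only; omega),
            if_neg (by rintro (h | ⟨h1, h2⟩); exact hC h; omega)]
          simp

-- ===== VERDICT (by name: the statements are the Claim_ definitions above) =====
theorem remove_points_to_increase_spec : Claim_equal_remove_points_to_increase := by
  intro lst weights _ hpre
  unfold Spec_remove_points_to_increase
  obtain ⟨hne, -, -, -⟩ := hpre
  obtain ⟨h1, h2, h3, h4⟩ := pv_main lst weights lst.length le_rfl
  simp only [remove_points_to_increase, remove_points_to_increase_alt]
  have hdplen : (pvA_dp lst weights).1.length = lst.length := by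
    rw [pvA_dp]; exact (pvA_dpN_len lst weights lst.length).1
  have hdne : (pvA_dp lst weights).1 ≠ [] := by
    intro h
    rw [h] at hdplen
    simp only [List.length_nil] at hdplen
    exact hne (List.length_eq_zero_iff.mp hdplen.symm)
  obtain ⟨m, k, hm, hk, hb⟩ := pv_argmax_eq (pvA_dp lst weights).1 hdne
  rw [hdplen] at hb
  rw [hm, h4, hb]
  simp only [Option.map_some]
  rw [hk]
  simp only [Option.getD_some, neg_neg]
  rw [h2]
  have hprev : (pvA_dp lst weights).2 = (pvA_dpN lst weights lst.length).2 := by rw [pvA_dp]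
  rw [hprev]
  have hmem : ∀ x : Int,
      x ∈ pvA_chain (pvA_dpN lst weights lst.length).2 (lst.length + 1) ((k : Nat) : Int) [] ↔
      x ∈ pvB_chain (pvA_dpN lst weights lst.length).2 (lst.length + 1) ((k : Nat) : Int)
          PySem.Set.empty :=
    pv_chain_mem _ _ _ _ _ (by simp [PySem.Set.empty])
  rw [PySem.List.enumerate_eq_map_pyRange lst ([], [])]
  rw [show PySem.List.len lst = (lst.length : Int) from rfl]
  rw [PySem.List.pyRange_zero_natCast]
  simp only [List.map_map, Function.comp_def, PySem.List.pyGetD_natCast]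
  exact pv_final_eq lst _ _ hmem (List.range lst.length)
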